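-- pv_equiv track=rewrite | github.com/jackstan/parks-advisor | src/trails_arcgis.py | _loop_core_length
-- ===== SOURCE A (Python) =====
-- def _loop_core_length(nodes, edges):
--     deg = {n: 0 for n in nodes}
--     adj = {n: [] for n in nodes}
--     for u, v, w in edges:
--         deg[u] += 1
--         deg[v] += 1
--         adj[u].append((v, w))
--         adj[v].append((u, w))
--
--     stack = [n for n, d in deg.items() if d <= 1]
--     keep = {n: True for n in nodes}
--
--     while stack:
--         n = stack.pop()
--         if not keep[n]:
--             continue
--         keep[n] = False
--         for nb, _ in adj[n]:
--             if keep[nb]: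
--                 deg[nb] -= 1
--                 if deg[nb] == 1:
--                     stack.append(nb)
--
--     core = {n for n, k in keep.items() if k}
--     return sum(w for u, v, w in edges if u in core and v in core)
-- ===== SOURCE B (Python) =====
-- def _loop_core_length(nodes, edges):
--     keep = set(nodes)
--     # round-1 degrees: with every node kept, the induced degree is the plain degree
--     deg = {n: 0 for n in nodes}
--     for u, v, w in edges:
--         deg[u] += 1
--         deg[v] += 1
--     while True:
--         drop = [n for n in nodes if n in keep and deg.get(n, 0) <= 1]
--         if not drop:
--             break
--         for n in drop:
--             keep.discard(n)
--         # recompute every kept node's degree inside the surviving subgraph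
--         deg = {}
--         for u, v, w in edges:
--             if u in keep and v in keep:
--                 deg[u] = deg.get(u, 0) + 1
--                 deg[v] = deg.get(v, 0) + 1
--     return sum(w for u, v, w in edges if u in keep and v in keep)
-- ===== Notes on version B (the rewrite author's own statement) =====
-- stated objective: simpler
-- what changed: Replaces the worklist/stack peeling with amortized degree decrements over prebuilt adjacency lists by a plain fixpoint loop that each round recomputes every kept node's induced degree from the original edge list and drops all nodes of degree <= 1 until a round removes nothing.
import Mathlib
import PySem

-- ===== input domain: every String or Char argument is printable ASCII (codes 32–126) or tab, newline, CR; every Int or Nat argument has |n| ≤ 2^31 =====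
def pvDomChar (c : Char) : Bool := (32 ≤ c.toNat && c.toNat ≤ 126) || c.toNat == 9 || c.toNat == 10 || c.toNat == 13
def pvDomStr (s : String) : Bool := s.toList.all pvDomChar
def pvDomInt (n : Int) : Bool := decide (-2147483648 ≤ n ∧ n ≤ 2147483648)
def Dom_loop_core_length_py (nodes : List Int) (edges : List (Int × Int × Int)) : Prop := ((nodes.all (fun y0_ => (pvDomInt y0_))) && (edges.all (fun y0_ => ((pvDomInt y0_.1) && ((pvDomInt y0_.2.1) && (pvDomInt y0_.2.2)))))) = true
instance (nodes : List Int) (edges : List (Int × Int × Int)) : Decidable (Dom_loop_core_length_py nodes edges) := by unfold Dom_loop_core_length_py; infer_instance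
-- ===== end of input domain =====

-- B replaces A's worklist peeling (stack + amortized degree decrements over adjacency
-- lists) by a simpler fixpoint loop that recomputes induced degrees from the original
-- edge list each round and drops all nodes of degree ≤ 1 until nothing changes.

-- ===== PORT A =====
-- first for-loop of A: deg[u]+=1; deg[v]+=1; adj[u].append((v,w)); adj[v].append((u,w)).
-- 'deg[u] += 1' is Dict.modify (exact inside Pre_, where every endpoint is a key;
-- Python raises KeyError outside Pre_).
def pyA_build (edges : List (Int × Int × Int))
    (dg : PySem.Dict Int Int) (aj : PySem.Dict Int (List (Int × Int))) :
    PySem.Dict Int Int × PySem.Dict Int (List (Int × Int)) :=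
  edges.foldl (fun p e =>
    ((p.1.modify e.1 0 (· + 1)).modify e.2.1 0 (· + 1),
     (p.2.modify e.1 [] (· ++ [(e.2.1, e.2.2)])).modify e.2.1 [] (· ++ [(e.1, e.2.2)])))
    (dg, aj)

-- termination measure helpers for the two while-loops (cited by decreasing_by)
theorem countP_map_false_lt (l : List (Int × Bool)) (n : Int)
    (h : (PySem.Dict.mk l).get? n = some true) :
    ((l.map (fun p => if (p.1 == n) = true then (n, false) else p)).countP (fun q => q.2))
      < l.countP (fun q => q.2) := by
  induction l with
  | nil => simp [PySem.Dict.get?] at h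
  | cons p t ih =>
    obtain ⟨k, v⟩ := p
    rw [PySem.Dict.get?_mk_cons] at h
    by_cases hk : (k == n) = true
    · obtain rfl : v = true := by simpa [hk] using h
      have hle : ((t.map (fun p => if (p.1 == n) = true then (n, false) else p)).countP (fun q => q.2)) ≤ t.countP (fun q => q.2) := by
        rw [List.countP_map]
        apply List.countP_mono_left
        intro a _ ha
        simp only [Function.comp] at ha
        by_cases h2 : (a.1 == n) = true
        · rw [if_pos h2] at ha; exact absurd ha (by simp)
        · rwa [if_neg h2] at ha
      rw [List.map_cons, List.countP_cons, List.countP_cons]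
      simp only [hk, if_pos]
      simp only [Bool.false_eq_true, if_false, add_zero]
      omega
    · have := ih (by simpa [hk] using h)
      rw [List.map_cons, List.countP_cons, List.countP_cons]
      simp only [hk, if_false, Bool.false_eq_true]
      omega

theorem foldl_discard_length_le (l : List Int) (s : PySem.Set Int) :
    (l.foldl PySem.Set.discard s).length ≤ s.length := by
  induction l generalizing s with
  | nil => simp
  | cons x t ih =>
    calc (List.foldl PySem.Set.discard (PySem.Set.discard s x) t).length
        ≤ (PySem.Set.discard s x).length := ih _
      _ ≤ s.length := List.length_filter_le _ _

theorem pyB_discard_lt (keep : PySem.Set Int) (drop : List Int)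
    (h0 : drop ≠ []) (h1 : ∀ x ∈ drop, x ∈ keep) :
    (drop.foldl PySem.Set.discard keep).length < keep.length := by
  obtain ⟨d0, rest, rfl⟩ : ∃ a l, drop = a :: l := by
    cases drop with | nil => tauto | cons a l => exact ⟨a, l, rfl⟩
  rw [List.foldl_cons]
  have hd : (PySem.Set.discard keep d0).length < keep.length := by
    have hm : d0 ∈ keep := h1 d0 (by simp)
    unfold PySem.Set.discard
    rw [List.length_filter_lt_length_iff_exists]
    exact ⟨d0, hm, by simp⟩
  exact lt_of_le_of_lt (foldl_discard_length_le _ _) hd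

theorem pyA_countP_insert_false_lt (keep : PySem.Dict Int Bool) (n : Int)
    (h : keep.getD n false = true) :
    ((keep.insert n false).items.countP (fun q => q.2)) < (keep.items.countP (fun q => q.2)) := by
  have hg : keep.get? n = some true := by
    rcases hgg : keep.get? n with _ | v
    · rw [PySem.Dict.getD_eq_get?_getD, hgg] at h; simp at h
    · rw [PySem.Dict.getD_eq_get?_getD, hgg] at h; simp at h; simp [h]
  have hc : keep.contains n = true := by rw [PySem.Dict.contains_eq_isSome_get?, hg]; rfl
  rw [PySem.Dict.items_insert_of_contains _ _ hc]
  obtain ⟨l⟩ := keep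
  exact countP_map_false_lt l n hg

-- the body of A's neighbour loop (deg[nb] -= 1; push nb when it hits 1)
def innerF (kp : PySem.Dict Int Bool) : PySem.Dict Int Int × List Int → Int × Int → PySem.Dict Int Int × List Int :=
  fun p nb =>
    if kp.getD nb.1 false then
      let d' := p.1.modify nb.1 0 (· - 1)
      if d'.getD nb.1 0 = 1 then (d', nb.1 :: p.2) else (d', p.2)
    else p

-- A's while-loop; the stack's TOP is the list head (Python pops/appends at the end).
def pyA_loop (adj : PySem.Dict Int (List (Int × Int))) (deg : PySem.Dict Int Int)
    (keep : PySem.Dict Int Bool) (stack : List Int) : PySem.Dict Int Bool :=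
  match stack with
  | [] => keep
  | n :: stack =>
    if h : keep.getD n false = false then pyA_loop adj deg keep stack
    else
      let keep' := keep.insert n false
      let ds := (adj.getD n []).foldl (innerF keep') (deg, stack)
      pyA_loop adj ds.1 keep' ds.2
termination_by ((keep.items.countP (fun q => q.2)), stack.length)
decreasing_by
  · exact Prod.Lex.right _ (Nat.lt_succ_self _)
  · exact Prod.Lex.left _ _ (pyA_countP_insert_false_lt keep n (by simpa using h))

def loop_core_length_py (nodes : List Int) (edges : List (Int × Int × Int)) : Int :=
  let deg0 : PySem.Dict Int Int := nodes.foldl (fun d n => d.insert n 0) .empty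
  let adj0 : PySem.Dict Int (List (Int × Int)) := nodes.foldl (fun d n => d.insert n []) .empty
  let da := pyA_build edges deg0 adj0
  let stack0 := ((da.1.items.filter (fun q => decide (q.2 ≤ 1))).map (·.1)).reverse
  let keep0 : PySem.Dict Int Bool := nodes.foldl (fun d n => d.insert n true) .empty
  let keepF := pyA_loop da.2 da.1 keep0 stack0
  let core : PySem.Set Int := PySem.Set.ofList ((keepF.items.filter (fun q => q.2)).map (·.1))
  edges.foldl (fun s e => if core.contains e.1 && core.contains e.2.1 then s + e.2.2 else s) 0

-- ===== PORT B =====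
-- B's per-edge degree update inside the loop: count an edge iff both endpoints are kept
def pyB_degStep (keep : PySem.Set Int) : PySem.Dict Int Int → Int × Int × Int → PySem.Dict Int Int :=
  fun d e =>
    if keep.contains e.1 && keep.contains e.2.1 then
      let d1 := d.insert e.1 (d.getD e.1 0 + 1)
      d1.insert e.2.1 (d1.getD e.2.1 0 + 1)
    else d

-- recompute degrees over the surviving subgraph ('deg = {}; for u,v,w in edges: ...')
def pyB_recompute (edges : List (Int × Int × Int)) (keep : PySem.Set Int) : PySem.Dict Int Int :=
  edges.foldl (pyB_degStep keep) .empty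

-- one round's removal list: the kept nodes whose current degree is ≤ 1
def pyB_drop (nodes : List Int) (keep : PySem.Set Int) (deg : PySem.Dict Int Int) : List Int :=
  nodes.filter (fun n => keep.contains n && decide (deg.getD n 0 ≤ 1))

-- B's 'while True': drop, recompute degrees on the survivors, until a round drops nothing
def pyB_loop (nodes : List Int) (edges : List (Int × Int × Int))
    (keep : PySem.Set Int) (deg : PySem.Dict Int Int) : PySem.Set Int :=
  if h : pyB_drop nodes keep deg = [] then keep
  else
    let keep' := (pyB_drop nodes keep deg).foldl PySem.Set.discard keep
    pyB_loop nodes edges keep' (pyB_recompute edges keep')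
termination_by keep.length
decreasing_by
  refine pyB_discard_lt keep _ h ?_
  intro x hx
  simp only [pyB_drop, List.mem_filter, Bool.and_eq_true, decide_eq_true_eq] at hx
  exact (PySem.Set.contains_iff _ _).1 hx.2.1

def loop_core_length_py_alt (nodes : List Int) (edges : List (Int × Int × Int)) : Int :=
  -- round-1 degrees: 'deg = {n: 0 for n in nodes}; for u,v,w in edges: deg[u] += 1; deg[v] += 1'
  -- ('deg[u] += 1' is Dict.modify; exact inside Pre_, where Python B does not raise KeyError)
  let deg0 : PySem.Dict Int Int := edges.foldl
    (fun d e => (d.modify e.1 0 (· + 1)).modify e.2.1 0 (· + 1))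
    (nodes.foldl (fun d n => d.insert n 0) .empty)
  let keepF := pyB_loop nodes edges (PySem.Set.ofList nodes) deg0
  edges.foldl (fun s e => if keepF.contains e.1 && keepF.contains e.2.1 then s + e.2.2 else s) 0

-- ===== PRECONDITION & SPEC =====
-- Pre_: every edge endpoint occurs in nodes — exactly where A's 'deg[u] += 1' /
-- 'deg[v] += 1' do not raise KeyError.
def Pre_loop_core_length_py (nodes : List Int) (edges : List (Int × Int × Int)) : Prop :=
  ∀ e ∈ edges, e.1 ∈ nodes ∧ e.2.1 ∈ nodes
instance (nodes : List Int) (edges : List (Int × Int × Int)) : Decidable (Pre_loop_core_length_py nodes edges) := by unfold Pre_loop_core_length_py; infer_instance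
def pvWitness_loop_core_length_py : List Int × (List (Int × Int × Int)) :=
  ([1, 2, 3, 4], [(1, 2, 5), (2, 3, 4), (3, 1, 1), (3, 4, 7)])

def Spec_loop_core_length_py (nodes : List Int) (edges : List (Int × Int × Int)) (out : Int) : Prop := out = loop_core_length_py_alt nodes edges
instance (nodes : List Int) (edges : List (Int × Int × Int)) (out : Int) : Decidable (Spec_loop_core_length_py nodes edges out) := by unfold Spec_loop_core_length_py; infer_instance

-- ===== CLAIM (what is proved, stated in full; the proofs are below) =====
def Claim_equal_loop_core_length_py : Prop := ∀ (nodes : List Int) (edges : List (Int × Int × Int)), Dom_loop_core_length_py nodes edges → Pre_loop_core_length_py nodes edges → Spec_loop_core_length_py nodes edges (loop_core_length_py nodes edges)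

-- ===== LEMMAS AND PROOFS =====

-- induced degree of n in the subgraph on {m | K m}: one per incidence whose other
-- endpoint is kept (a self-loop of a kept node counts twice), as an Int sum.
def degOf (edges : List (Int × Int × Int)) (K : Int → Bool) (n : Int) : Int :=
  (edges.map (fun e => (if e.1 = n ∧ K e.2.1 = true then 1 else 0)
                     + (if e.2.1 = n ∧ K e.1 = true then (1 : Int) else 0))).sum

-- number of incidences pairing n with m
def cntE (edges : List (Int × Int × Int)) (n m : Int) : Int :=
  (edges.map (fun e => (if e.1 = n ∧ e.2.1 = m then 1 else 0)
                     + (if e.2.1 = n ∧ e.1 = m then (1 : Int) else 0))).sum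

-- adjacency list of n as A's first loop builds it
def adjL (edges : List (Int × Int × Int)) (n : Int) : List (Int × Int) :=
  edges.flatMap (fun e => (if e.1 = n then [(e.2.1, e.2.2)] else [])
                        ++ (if e.2.1 = n then [(e.1, e.2.2)] else []))

def goodSet (edges : List (Int × Int × Int)) (K : Int → Bool) : Prop :=
  ∀ n, K n = true → 2 ≤ degOf edges K n

def memA (keep : PySem.Dict Int Bool) : Int → Bool := fun m => keep.getD m false

theorem degOf_mono (edges : List (Int × Int × Int)) (K K' : Int → Bool)
    (h : ∀ x, K x = true → K' x = true) (m : Int) :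
    degOf edges K m ≤ degOf edges K' m := by
  induction edges with
  | nil => simp [degOf]
  | cons e t ih =>
    simp only [degOf, List.map_cons, List.sum_cons] at ih ⊢
    have h1 : (if e.1 = m ∧ K e.2.1 = true then (1 : Int) else 0)
        ≤ (if e.1 = m ∧ K' e.2.1 = true then (1 : Int) else 0) := by
      split_ifs with a b <;> first | omega | exact absurd ⟨a.1, h _ a.2⟩ b
    have h2 : (if e.2.1 = m ∧ K e.1 = true then (1 : Int) else 0)
        ≤ (if e.2.1 = m ∧ K' e.1 = true then (1 : Int) else 0) := by
      split_ifs with a b <;> first | omega | exact absurd ⟨a.1, h _ a.2⟩ b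
    omega

theorem cntE_symm (edges : List (Int × Int × Int)) (n m : Int) :
    cntE edges n m = cntE edges m n := by
  induction edges with
  | nil => rfl
  | cons e t ih =>
    simp only [cntE, List.map_cons, List.sum_cons] at ih ⊢
    have : (if e.1 = n ∧ e.2.1 = m then (1 : Int) else 0) + (if e.2.1 = n ∧ e.1 = m then (1 : Int) else 0)
        = (if e.1 = m ∧ e.2.1 = n then (1 : Int) else 0) + (if e.2.1 = m ∧ e.1 = n then (1 : Int) else 0) := by
      split_ifs <;> first | rfl | omega
    omega

theorem degOf_remove (edges : List (Int × Int × Int)) (K : Int → Bool) (n : Int)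
    (hn : K n = true) (m : Int) :
    degOf edges K m = degOf edges (fun x => if x = n then false else K x) m + cntE edges m n := by
  induction edges with
  | nil => simp [degOf, cntE]
  | cons e t ih =>
    simp only [degOf, cntE, List.map_cons, List.sum_cons] at ih ⊢
    have h1 : (if e.1 = m ∧ K e.2.1 = true then (1 : Int) else 0)
        = (if e.1 = m ∧ (if e.2.1 = n then false else K e.2.1) = true then (1 : Int) else 0)
          + (if e.1 = m ∧ e.2.1 = n then (1 : Int) else 0) := by
      by_cases hv : e.2.1 = n <;> simp only [hv, if_pos, if_false] <;>
        split_ifs <;> simp_all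
    have h2 : (if e.2.1 = m ∧ K e.1 = true then (1 : Int) else 0)
        = (if e.2.1 = m ∧ (if e.1 = n then false else K e.1) = true then (1 : Int) else 0)
          + (if e.2.1 = m ∧ e.1 = n then (1 : Int) else 0) := by
      by_cases hu : e.1 = n <;> simp only [hu, if_pos, if_false] <;>
        split_ifs <;> simp_all
    omega

theorem countP_adjL (edges : List (Int × Int × Int)) (n m : Int) :
    ((adjL edges n).countP (fun p => p.1 == m) : Int) = cntE edges n m := by
  induction edges with
  | nil => rfl
  | cons e t ih =>
    have h1 : (((if e.1 = n then [(e.2.1, e.2.2)] else []) : List (Int × Int)).countP (fun p => p.1 == m) : Int)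
        = (if e.1 = n ∧ e.2.1 = m then (1 : Int) else 0) := by
      by_cases hu : e.1 = n <;> simp only [hu, if_true, if_false, List.countP_cons,
        List.countP_nil] <;> split_ifs <;> simp_all
    have h2 : (((if e.2.1 = n then [(e.1, e.2.2)] else []) : List (Int × Int)).countP (fun p => p.1 == m) : Int)
        = (if e.2.1 = n ∧ e.1 = m then (1 : Int) else 0) := by
      by_cases hv : e.2.1 = n <;> simp only [hv, if_true, if_false, List.countP_cons,
        List.countP_nil] <;> split_ifs <;> simp_all
    simp only [adjL, cntE, List.flatMap_cons, List.map_cons, List.sum_cons,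
      List.countP_append] at ih ⊢
    push_cast
    omega

theorem pyA_build_deg (edges : List (Int × Int × Int)) (dg : PySem.Dict Int Int)
    (aj : PySem.Dict Int (List (Int × Int))) (m : Int) :
    (pyA_build edges dg aj).1.getD m 0
      = dg.getD m 0 + (edges.map (fun e => (if e.1 = m then 1 else 0)
                                          + (if e.2.1 = m then (1 : Int) else 0))).sum := by
  induction edges generalizing dg aj with
  | nil => simp [pyA_build]
  | cons e t ih =>
    rw [show pyA_build (e :: t) dg aj
        = pyA_build t ((dg.modify e.1 0 (· + 1)).modify e.2.1 0 (· + 1))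
            ((aj.modify e.1 [] (· ++ [(e.2.1, e.2.2)])).modify e.2.1 [] (· ++ [(e.1, e.2.2)])) from rfl]
    rw [ih]
    simp only [List.map_cons, List.sum_cons, PySem.Dict.getD_modify]
    split_ifs <;> subst_vars <;> simp_all <;> omega

theorem pyA_build_adj (edges : List (Int × Int × Int)) (dg : PySem.Dict Int Int)
    (aj : PySem.Dict Int (List (Int × Int))) (n : Int) :
    (pyA_build edges dg aj).2.getD n [] = aj.getD n [] ++ adjL edges n := by
  induction edges generalizing dg aj with
  | nil => simp [pyA_build, adjL]
  | cons e t ih =>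
    rw [show pyA_build (e :: t) dg aj
        = pyA_build t ((dg.modify e.1 0 (· + 1)).modify e.2.1 0 (· + 1))
            ((aj.modify e.1 [] (· ++ [(e.2.1, e.2.2)])).modify e.2.1 [] (· ++ [(e.1, e.2.2)])) from rfl]
    rw [ih]
    simp only [adjL, List.flatMap_cons, PySem.Dict.getD_modify]
    split_ifs <;> subst_vars <;> simp_all [List.append_assoc]


theorem innerL1 (kp : PySem.Dict Int Bool) (L : List (Int × Int)) (m : Int) :
    ∀ (deg : PySem.Dict Int Int) (st : List Int),
    ((L.foldl (innerF kp) (deg, st)).1).getD m 0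
      = deg.getD m 0 - (if kp.getD m false then ((L.countP (fun p => p.1 == m)) : Int) else 0) := by
  induction L with
  | nil => intro deg st; simp
  | cons nb T ih =>
    intro deg st
    rw [List.foldl_cons]
    by_cases hc : kp.getD nb.1 false = true
    · simp only [innerF, hc, if_true]
      by_cases h1 : (deg.modify nb.1 0 (· - 1)).getD nb.1 0 = 1 <;>
        simp only [h1, if_true, if_false] <;>
        rw [ih, PySem.Dict.getD_modify, List.countP_cons] <;>
        push_cast <;>
        by_cases hm : m = nb.1
      · subst hm; simp [hc]; omega
      · have hm' : (nb.1 == m) = false := beq_eq_false_iff_ne.2 (fun h => hm h.symm)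
        simp only [if_neg hm, hm', if_false, Bool.false_eq_true, add_zero]
      · subst hm; simp [hc]; omega
      · have hm' : (nb.1 == m) = false := beq_eq_false_iff_ne.2 (fun h => hm h.symm)
        simp only [if_neg hm, hm', if_false, Bool.false_eq_true, add_zero]
    · simp only [innerF]
      rw [if_neg hc, ih, List.countP_cons]
      by_cases hkm : kp.getD m false = true
      · have hm' : (nb.1 == m) = false := by
          by_cases h : nb.1 = m
          · exact absurd (by rw [h]; exact hkm) hc
          · simp [h]
        simp [hkm, hm']
      · simp [hkm]

theorem innerL2 (kp : PySem.Dict Int Bool) (L : List (Int × Int)) :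
    ∀ (deg : PySem.Dict Int Int) (st : List Int) (x : Int), x ∈ st →
      x ∈ (L.foldl (innerF kp) (deg, st)).2 := by
  induction L with
  | nil => intro _ _ _ h; simpa using h
  | cons nb T ih =>
    intro deg st x hx
    rw [List.foldl_cons]
    by_cases hc : kp.getD nb.1 false = true
    · simp only [innerF, hc, if_true]
      by_cases h1 : (deg.modify nb.1 0 (· - 1)).getD nb.1 0 = 1 <;>
        simp only [h1, if_true, if_false]
      · exact ih _ _ x (List.mem_cons_of_mem _ hx)
      · exact ih _ _ x hx
    · simp only [innerF]
      rw [if_neg hc]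
      exact ih _ _ x hx

theorem innerL3 (kp : PySem.Dict Int Bool) (L : List (Int × Int)) :
    ∀ (deg : PySem.Dict Int Int) (st : List Int) (m : Int),
      m ∈ (L.foldl (innerF kp) (deg, st)).2 →
      m ∈ st ∨ (kp.getD m false = true ∧ ((L.foldl (innerF kp) (deg, st)).1).getD m 0 ≤ 1) := by
  induction L with
  | nil => intro _ _ _ h; exact Or.inl (by simpa using h)
  | cons nb T ih =>
    intro deg st m hm
    rw [List.foldl_cons] at hm ⊢
    by_cases hc : kp.getD nb.1 false = true
    · simp only [innerF, hc, if_true] at hm ⊢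
      by_cases h1 : (deg.modify nb.1 0 (· - 1)).getD nb.1 0 = 1 <;>
        simp only [h1, if_true, if_false] at hm ⊢
      · rcases ih _ _ m hm with h | h
        · rcases List.mem_cons.1 h with rfl | h
          · refine Or.inr ⟨hc, ?_⟩
            rw [innerL1, h1]
            split_ifs <;> omega
          · exact Or.inl h
        · exact Or.inr h
      · rcases ih _ _ m hm with h | h
        · exact Or.inl h
        · exact Or.inr h
    · simp only [innerF] at hm ⊢
      rw [if_neg hc] at hm ⊢
      exact ih _ _ m hm

theorem innerL4 (kp : PySem.Dict Int Bool) (L : List (Int × Int)) :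
    ∀ (deg : PySem.Dict Int Int) (st : List Int) (m : Int),
      kp.getD m false = true →
      ((L.foldl (innerF kp) (deg, st)).1).getD m 0 ≤ 1 →
      2 ≤ deg.getD m 0 →
      m ∈ (L.foldl (innerF kp) (deg, st)).2 := by
  induction L with
  | nil => intro deg st m _ h1 h2; simp at h1; omega
  | cons nb T ih =>
    intro deg st m hk hfin hdeg
    rw [List.foldl_cons] at hfin ⊢
    by_cases hc : kp.getD nb.1 false = true
    · simp only [innerF, hc, if_true] at hfin ⊢
      by_cases hm : nb.1 = m
      · subst hm
        have hd' : (deg.modify nb.1 0 (· - 1)).getD nb.1 0 = deg.getD nb.1 0 - 1 := by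
          rw [PySem.Dict.getD_modify]; simp
        by_cases h1 : (deg.modify nb.1 0 (· - 1)).getD nb.1 0 = 1 <;>
          simp only [h1, if_true, if_false] at hfin ⊢
        · exact innerL2 _ _ _ _ _ (List.mem_cons_self)
        · exact ih _ _ _ hk hfin (by omega)
      · have hd' : (deg.modify nb.1 0 (· - 1)).getD m 0 = deg.getD m 0 :=
          PySem.Dict.getD_modify_of_ne _ _ _ (fun h => hm h.symm)
        by_cases h1 : (deg.modify nb.1 0 (· - 1)).getD nb.1 0 = 1 <;>
          simp only [h1, if_true, if_false] at hfin ⊢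
        · exact ih _ _ _ hk hfin (by omega)
        · exact ih _ _ _ hk hfin (by omega)
    · simp only [innerF] at hfin ⊢
      rw [if_neg hc] at hfin ⊢
      exact ih _ _ _ hk hfin hdeg


theorem foldl_insert_const_getD {v : Type} [BEq v] [LawfulBEq v] (nodes : List Int)
    (c dflt : v) : ∀ (d : PySem.Dict Int v) (m : Int),
    (nodes.foldl (fun d n => d.insert n c) d).getD m dflt
      = if m ∈ nodes then c else d.getD m dflt := by
  induction nodes with
  | nil => intro d m; simp
  | cons x t ih =>
    intro d m
    rw [List.foldl_cons, ih]
    rw [PySem.Dict.getD_insert]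
    by_cases h1 : m ∈ t <;> by_cases h2 : m = x <;> simp [h1, h2]

theorem foldl_insert_nodup_keys {v : Type} (nodes : List Int) (c : v) :
    ∀ (d : PySem.Dict Int v), d.keys.Nodup →
    (nodes.foldl (fun d n => d.insert n c) d).keys.Nodup := by
  induction nodes with
  | nil => intro d h; exact h
  | cons x t ih => intro d h; exact ih _ (PySem.Dict.nodup_keys_insert _ _ _ h)

theorem pyA_build_nodup (edges : List (Int × Int × Int)) :
    ∀ (dg : PySem.Dict Int Int) (aj : PySem.Dict Int (List (Int × Int))),
    dg.keys.Nodup → (pyA_build edges dg aj).1.keys.Nodup := by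
  induction edges with
  | nil => intro dg aj h; exact h
  | cons e t ih =>
    intro dg aj h
    rw [show pyA_build (e :: t) dg aj
        = pyA_build t ((dg.modify e.1 0 (· + 1)).modify e.2.1 0 (· + 1))
            ((aj.modify e.1 [] (· ++ [(e.2.1, e.2.2)])).modify e.2.1 [] (· ++ [(e.1, e.2.2)])) from rfl]
    refine ih _ _ ?_
    rw [PySem.Dict.modify, PySem.Dict.modify]
    exact PySem.Dict.nodup_keys_insert _ _ _ (PySem.Dict.nodup_keys_insert _ _ _ h)

theorem pyA_build_contains (edges : List (Int × Int × Int)) :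
    ∀ (dg : PySem.Dict Int Int) (aj : PySem.Dict Int (List (Int × Int))) (m : Int),
    dg.contains m = true → (pyA_build edges dg aj).1.contains m = true := by
  induction edges with
  | nil => intro dg aj m h; exact h
  | cons e t ih =>
    intro dg aj m h
    rw [show pyA_build (e :: t) dg aj
        = pyA_build t ((dg.modify e.1 0 (· + 1)).modify e.2.1 0 (· + 1))
            ((aj.modify e.1 [] (· ++ [(e.2.1, e.2.2)])).modify e.2.1 [] (· ++ [(e.1, e.2.2)])) from rfl]
    refine ih _ _ _ ?_
    rw [PySem.Dict.modify, PySem.Dict.modify, PySem.Dict.contains_insert, PySem.Dict.contains_insert, h]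
    simp

theorem foldl_insert_contains {v : Type} (nodes : List Int) (c : v) :
    ∀ (d : PySem.Dict Int v) (m : Int), m ∈ nodes →
    (nodes.foldl (fun d n => d.insert n c) d).contains m = true := by
  induction nodes with
  | nil => intro d m h; simp at h
  | cons x t ih =>
    intro d m h
    rw [List.foldl_cons]
    rcases List.mem_cons.1 h with rfl | h
    · by_cases ht : m ∈ t
      · exact ih _ _ ht
      · have : ∀ (d' : PySem.Dict Int v), d'.contains m = true →
            (t.foldl (fun d n => d.insert n c) d').contains m = true := by
          intro d' hd'
          clear ih h ht
          induction t generalizing d' with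
          | nil => exact hd'
          | cons y s ihs =>
            rw [List.foldl_cons]
            refine ihs _ ?_
            rw [PySem.Dict.contains_insert, hd']; simp
        exact this _ (PySem.Dict.contains_insert_self _ _ _)
    · exact ih _ _ h

theorem pyA_loop_nodup (adj : PySem.Dict Int (List (Int × Int))) :
    ∀ (deg : PySem.Dict Int Int) (keep : PySem.Dict Int Bool) (stack : List Int),
    keep.keys.Nodup → (pyA_loop adj deg keep stack).keys.Nodup := by
  intro deg keep stack
  fun_induction pyA_loop adj deg keep stack with
  | case1 => intro h; simpa [pyA_loop] using h
  | case2 deg keep n stack h ih => intro hk; exact ih hk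
  | case3 deg keep n stack h keep' ds ih =>
    intro hk
    exact ih (PySem.Dict.nodup_keys_insert _ _ _ hk)

theorem core_contains (keep : PySem.Dict Int Bool) (hnd : keep.keys.Nodup) (m : Int) :
    (PySem.Set.ofList ((keep.items.filter (fun q => q.2)).map (·.1))).contains m
      = keep.getD m false := by
  have hmem : m ∈ (keep.items.filter (fun q => q.2)).map (·.1) ↔ keep.get? m = some true := by
    rw [List.mem_map]
    constructor
    · rintro ⟨p, hp, rfl⟩
      have := List.mem_filter.1 hp
      have hp2 : p.2 = true := this.2
      have : (p.1, true) ∈ keep.items := by rw [← hp2]; exact this.1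
      exact (PySem.Dict.get?_eq_some_iff_mem_items _ _ _ hnd).2 this
    · intro hg
      exact ⟨(m, true), List.mem_filter.2 ⟨(PySem.Dict.get?_eq_some_iff_mem_items _ _ _ hnd).1 hg, rfl⟩, rfl⟩
  rcases hg : keep.get? m with _ | v
  · have : keep.getD m false = false := by rw [PySem.Dict.getD_eq_get?_getD, hg]; rfl
    rw [this]
    rw [← Bool.not_eq_true]
    intro hcon
    rw [PySem.Set.contains_iff, PySem.Set.mem_ofList, hmem, hg] at hcon
    cases hcon
  · have hv : keep.getD m false = v := by rw [PySem.Dict.getD_eq_get?_getD, hg]; rfl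
    rw [hv]
    cases v
    · rw [← Bool.not_eq_true]
      intro hcon
      rw [PySem.Set.contains_iff, PySem.Set.mem_ofList, hmem, hg] at hcon
      simp at hcon
    · rw [PySem.Set.contains_iff, PySem.Set.mem_ofList, hmem, hg]


theorem pyA_loop_main (edges : List (Int × Int × Int)) (adj : PySem.Dict Int (List (Int × Int)))
    (hadj : ∀ n, adj.getD n [] = adjL edges n)
    (deg : PySem.Dict Int Int) (keep : PySem.Dict Int Bool) (stack : List Int) :
    (∀ m, memA keep m = true → deg.getD m 0 = degOf edges (memA keep) m) →
    (∀ m, memA keep m = true → degOf edges (memA keep) m ≤ 1 → m ∈ stack) →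
    (∀ m, m ∈ stack → memA keep m = true → degOf edges (memA keep) m ≤ 1) →
    (∀ m, memA (pyA_loop adj deg keep stack) m = true → memA keep m = true)
    ∧ goodSet edges (memA (pyA_loop adj deg keep stack))
    ∧ (∀ K, goodSet edges K → (∀ x, K x = true → memA keep x = true) →
        ∀ x, K x = true → memA (pyA_loop adj deg keep stack) x = true) := by
  fun_induction pyA_loop adj deg keep stack with
  | case1 deg keep =>
    intro I1 I2 I3
    refine ⟨fun m hm => hm, ?_, fun K _ hK x hx => hK x hx⟩
    intro m hm
    by_contra hcon
    have : degOf edges (memA keep) m ≤ 1 := by omega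
    simpa using I2 m hm this
  | case2 deg keep n stack h ih =>
    intro I1 I2 I3
    have hn : memA keep n = false := h
    refine ih I1 ?_ ?_
    · intro m hm hd
      rcases List.mem_cons.1 (I2 m hm hd) with rfl | hs
      · rw [hn] at hm; cases hm
      · exact hs
    · intro m hms hm
      exact I3 m (List.mem_cons_of_mem _ hms) hm
  | case3 deg keep n stack h keep' ds ih =>
    intro I1 I2 I3
    have hn : memA keep n = true := by simpa [memA] using h
    have hK' : memA keep' = fun m => if m = n then false else memA keep m := by
      funext m
      simp only [memA, keep']
      rw [PySem.Dict.getD_insert]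
    have hsub : ∀ m, memA keep' m = true → memA keep m = true := by
      intro m hm
      rw [hK'] at hm
      by_cases hmn : m = n
      · simp [hmn] at hm
      · simpa [hmn] using hm
    have hne : ∀ m, memA keep' m = true → m ≠ n := by
      intro m hm e
      subst e
      rw [hK'] at hm
      simp at hm
    have hLn : adj.getD n [] = adjL edges n := hadj n
    have hdegn : degOf edges (memA keep) n ≤ 1 := I3 n List.mem_cons_self hn
    have hI1' : ∀ m, memA keep' m = true → ds.1.getD m 0 = degOf edges (memA keep') m := by
      intro m hm
      have hm' : keep'.getD m false = true := hm
      have hkm : memA keep m = true := hsub m hm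
      have e1 : ds.1.getD m 0
          = deg.getD m 0 - ((adjL edges n).countP (fun p => p.1 == m) : Int) := by
        simp only [ds, hLn]
        rw [innerL1, if_pos hm']
      rw [e1, I1 m hkm, countP_adjL, cntE_symm]
      have hrm := degOf_remove edges (memA keep) n hn m
      rw [hK']
      omega
    have hI2' : ∀ m, memA keep' m = true → degOf edges (memA keep') m ≤ 1 → m ∈ ds.2 := by
      intro m hm hd
      have hm' : keep'.getD m false = true := hm
      have hkm : memA keep m = true := hsub m hm
      by_cases hcase : degOf edges (memA keep) m ≤ 1
      · rcases List.mem_cons.1 (I2 m hkm hcase) with rfl | hs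
        · exact absurd rfl (hne m hm)
        · simp only [ds, hLn]
          exact innerL2 keep' _ deg stack m hs
      · have h2 : 2 ≤ deg.getD m 0 := by rw [I1 m hkm]; omega
        have hfin : ds.1.getD m 0 ≤ 1 := by rw [hI1' m hm]; exact hd
        simp only [ds, hLn] at hfin ⊢
        exact innerL4 keep' _ deg stack m hm' hfin h2
    have hI3' : ∀ m, m ∈ ds.2 → memA keep' m = true → degOf edges (memA keep') m ≤ 1 := by
      intro m hms hm
      have hkm : memA keep m = true := hsub m hm
      have hms2 : m ∈ (List.foldl (innerF keep') (deg, stack) (adjL edges n)).2 := by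
        simpa only [ds, hLn] using hms
      rcases innerL3 keep' _ deg stack m hms2 with hs | ⟨_, hfin⟩
      · have := I3 m (List.mem_cons_of_mem _ hs) hkm
        have hmono := degOf_mono edges (memA keep') (memA keep) hsub m
        omega
      · have := hI1' m hm
        simp only [ds, hLn] at this
        omega
    obtain ⟨ha, hb, hc⟩ := ih hI1' hI2' hI3'
    refine ⟨fun m hmf => hsub m (ha m hmf), hb, ?_⟩
    intro K hgood hKsub x hx
    refine hc K hgood ?_ x hx
    intro y hy
    have hyk := hKsub y hy
    have hyn : y ≠ n := by
      intro e
      subst e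
      have h2 := hgood y hy
      have h3 := degOf_mono edges K (memA keep) hKsub y
      omega
    rw [hK']
    simp [hyn, hyk]


theorem pyB_deg (keep : PySem.Set Int) (edges : List (Int × Int × Int)) (n : Int)
    (hn : keep.contains n = true) :
    ∀ (d : PySem.Dict Int Int),
    (edges.foldl (pyB_degStep keep) d).getD n 0
      = d.getD n 0 + degOf edges (fun m => keep.contains m) n := by
  induction edges with
  | nil => intro d; simp [degOf]
  | cons e t ih =>
    intro d
    rw [List.foldl_cons, ih]
    simp only [degOf, List.map_cons, List.sum_cons]
    by_cases hcond : (keep.contains e.1 && keep.contains e.2.1) = true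
    · rw [Bool.and_eq_true] at hcond
      obtain ⟨hc1, hc2⟩ := hcond
      have hstep : pyB_degStep keep d e
          = (d.insert e.1 (d.getD e.1 0 + 1)).insert e.2.1
              ((d.insert e.1 (d.getD e.1 0 + 1)).getD e.2.1 0 + 1) := by
        simp only [pyB_degStep]
        rw [if_pos (by rw [Bool.and_eq_true]; exact ⟨hc1, hc2⟩)]
      rw [hstep, PySem.Dict.getD_insert, PySem.Dict.getD_insert, PySem.Dict.getD_insert]
      simp only [hc1, hc2, and_true]
      clear ih
      by_cases b1 : n = e.2.1
      · subst b1
        by_cases b2 : e.1 = e.2.1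
        · simp [b2]
          omega
        · have b2' : ¬ e.2.1 = e.1 := fun h => b2 h.symm
          simp [b2, b2']
          omega
      · by_cases b2 : n = e.1
        · subst b2
          have b1' : ¬ e.2.1 = e.1 := fun h => b1 h.symm
          simp [b1, b1']
          omega
        · have b1' : ¬ e.2.1 = n := fun h => b1 h.symm
          have b2' : ¬ e.1 = n := fun h => b2 h.symm
          simp [b1, b2, b1', b2']
    · have hstep : pyB_degStep keep d e = d := by
        simp only [pyB_degStep]
        rw [if_neg (by simpa using hcond)]
      have hs1 : ¬(e.1 = n ∧ keep.contains e.2.1 = true) := by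
        rintro ⟨rfl, hb⟩
        exact hcond (by rw [Bool.and_eq_true]; exact ⟨hn, hb⟩)
      have hs2 : ¬(e.2.1 = n ∧ keep.contains e.1 = true) := by
        rintro ⟨rfl, hb⟩
        exact hcond (by rw [Bool.and_eq_true]; exact ⟨hb, hn⟩)
      rw [hstep, if_neg hs1, if_neg hs2]
      omega

theorem mem_foldl_discard (l : List Int) :
    ∀ (s : PySem.Set Int) (y : Int),
    y ∈ l.foldl PySem.Set.discard s ↔ y ∈ s ∧ y ∉ l := by
  induction l with
  | nil => intro s y; simp
  | cons x t ih =>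
    intro s y
    rw [List.foldl_cons, ih, PySem.Set.mem_discard]
    simp only [List.mem_cons]
    tauto

theorem pyB_degInit (edges : List (Int × Int × Int)) (m : Int) :
    ∀ (d : PySem.Dict Int Int),
    (edges.foldl (fun d e => (d.modify e.1 0 (· + 1)).modify e.2.1 0 (· + 1)) d).getD m 0
      = d.getD m 0 + (edges.map (fun e => (if e.1 = m then 1 else 0)
                                        + (if e.2.1 = m then (1 : Int) else 0))).sum := by
  induction edges with
  | nil => intro d; simp
  | cons e t ih =>
    intro d
    rw [List.foldl_cons, ih]
    simp only [List.map_cons, List.sum_cons, PySem.Dict.getD_modify]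
    split_ifs <;> subst_vars <;> simp_all <;> omega

theorem pyB_loop_main (nodes : List Int) (edges : List (Int × Int × Int)) :
    ∀ (keep : PySem.Set Int) (deg : PySem.Dict Int Int),
    (∀ m, PySem.Set.contains keep m = true → m ∈ nodes) →
    (∀ m, PySem.Set.contains keep m = true →
        deg.getD m 0 = degOf edges (fun x => keep.contains x) m) →
    (∀ m, PySem.Set.contains (pyB_loop nodes edges keep deg) m = true → PySem.Set.contains keep m = true)
    ∧ goodSet edges (fun m => PySem.Set.contains (pyB_loop nodes edges keep deg) m)
    ∧ (∀ K, goodSet edges K → (∀ x, K x = true → PySem.Set.contains keep x = true) →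
        ∀ x, K x = true → PySem.Set.contains (pyB_loop nodes edges keep deg) x = true) := by
  intro keep deg
  fun_induction pyB_loop nodes edges keep deg with
  | case1 keep deg hstop =>
    intro hsub hdeg
    refine ⟨fun m hm => hm, ?_, fun K _ hK x hx => hK x hx⟩
    intro m hm
    by_contra hcon
    have hmdrop : m ∈ pyB_drop nodes keep deg := by
      simp only [pyB_drop]
      rw [List.mem_filter]
      refine ⟨hsub m hm, ?_⟩
      rw [Bool.and_eq_true]
      exact ⟨hm, by rw [decide_eq_true_iff, hdeg m hm]; omega⟩
    rw [hstop] at hmdrop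
    simp at hmdrop
  | case2 keep deg hstop keep' ih =>
    intro hsub hdeg
    have hdropdeg : ∀ x ∈ pyB_drop nodes keep deg,
        degOf edges (fun m => keep.contains m) x ≤ 1 ∧ keep.contains x = true := by
      intro x hx
      simp only [pyB_drop, List.mem_filter, Bool.and_eq_true, decide_eq_true_eq] at hx
      obtain ⟨_, hcx, hdx⟩ := hx
      rw [hdeg x hcx] at hdx
      exact ⟨hdx, hcx⟩
    have hsub2 : ∀ m, PySem.Set.contains keep' m = true →
        PySem.Set.contains keep m = true := by
      intro m hm
      rw [PySem.Set.contains_iff] at hm ⊢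
      exact ((mem_foldl_discard _ keep m).1 (by simpa only [keep'] using hm)).1
    have hdeg' : ∀ m, PySem.Set.contains keep' m = true →
        (pyB_recompute edges keep').getD m 0
          = degOf edges (fun x => keep'.contains x) m := by
      intro m hm
      rw [pyB_recompute, pyB_deg keep' edges m hm, PySem.Dict.getD_empty]
      omega
    obtain ⟨ha, hb, hc⟩ := ih (fun m hm => hsub m (hsub2 m hm)) hdeg'
    refine ⟨fun m hm => hsub2 m (ha m hm), hb, ?_⟩
    intro K hgood hKsub x hx
    refine hc K hgood ?_ x hx
    intro y hy
    have hyk := hKsub y hy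
    have hynd : y ∉ pyB_drop nodes keep deg := by
      intro hyd
      obtain ⟨hd1, _⟩ := hdropdeg y hyd
      have h2 := hgood y hy
      have h3 := degOf_mono edges K (fun m => keep.contains m) hKsub y
      omega
    show PySem.Set.contains keep' y = true
    rw [PySem.Set.contains_iff]
    simp only [keep']
    exact (mem_foldl_discard _ keep y).2 ⟨(PySem.Set.contains_iff _ _).1 hyk, hynd⟩

theorem loop_core_length_py_spec : Claim_equal_loop_core_length_py := by
  unfold Claim_equal_loop_core_length_py
  intro nodes edges _ hpre
  unfold Spec_loop_core_length_py loop_core_length_py loop_core_length_py_alt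
  simp only []
  set DEG0 : PySem.Dict Int Int := nodes.foldl (fun d n => d.insert n 0) .empty with hDEG0
  set ADJ0 : PySem.Dict Int (List (Int × Int)) := nodes.foldl (fun d n => d.insert n []) .empty with hADJ0
  set DA := pyA_build edges DEG0 ADJ0 with hDA
  set STACK0 := ((DA.1.items.filter (fun q => decide (q.2 ≤ 1))).map (·.1)).reverse with hSTACK0
  set KEEP0 : PySem.Dict Int Bool := nodes.foldl (fun d n => d.insert n true) .empty with hKEEP0
  set KF := pyA_loop DA.2 DA.1 KEEP0 STACK0 with hKF
  set CORE : PySem.Set Int := PySem.Set.ofList ((KF.items.filter (fun q => q.2)).map (·.1)) with hCORE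
  set DEGB : PySem.Dict Int Int := edges.foldl
      (fun d e => (d.modify e.1 0 (· + 1)).modify e.2.1 0 (· + 1))
      (nodes.foldl (fun d n => d.insert n 0) .empty) with hDEGB
  set BF := pyB_loop nodes edges (PySem.Set.ofList nodes) DEGB with hBF
  -- initial keep membership
  have hmem0 : ∀ m, memA KEEP0 m = true ↔ m ∈ nodes := by
    intro m
    rw [memA, hKEEP0, foldl_insert_const_getD]
    by_cases h : m ∈ nodes <;> simp [h]
  -- adjacency closed form
  have hadj : ∀ n, DA.2.getD n [] = adjL edges n := by
    intro n
    rw [hDA, pyA_build_adj, hADJ0, foldl_insert_const_getD]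
    by_cases h : n ∈ nodes <;> simp [h]
  -- degree closed form at start
  have hdeg0 : ∀ m, memA KEEP0 m = true → DA.1.getD m 0 = degOf edges (memA KEEP0) m := by
    intro m hm
    rw [hDA, pyA_build_deg, hDEG0, foldl_insert_const_getD]
    have hcong : ∀ e ∈ edges,
        ((if e.1 = m ∧ memA KEEP0 e.2.1 = true then (1 : Int) else 0)
          + (if e.2.1 = m ∧ memA KEEP0 e.1 = true then (1 : Int) else 0))
        = ((if e.1 = m then (1 : Int) else 0) + (if e.2.1 = m then (1 : Int) else 0)) := by
      intro e he
      have m1 : memA KEEP0 e.1 = true := (hmem0 _).2 (hpre e he).1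
      have m2 : memA KEEP0 e.2.1 = true := (hmem0 _).2 (hpre e he).2
      rw [m1, m2]
      simp
    rw [degOf, List.map_congr_left hcong]
    by_cases h : m ∈ nodes <;> simp [h]
  -- deg dict key facts
  have hnd : DA.1.keys.Nodup := by
    rw [hDA]
    refine pyA_build_nodup _ _ _ ?_
    rw [hDEG0]
    exact foldl_insert_nodup_keys _ _ _ (by simp [PySem.Dict.keys, PySem.Dict.empty])
  have hcont : ∀ m, m ∈ nodes → DA.1.contains m = true := by
    intro m hm
    rw [hDA]
    exact pyA_build_contains _ _ _ _ (by rw [hDEG0]; exact foldl_insert_contains _ _ _ _ hm)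
  have hget : ∀ m, m ∈ nodes → DA.1.get? m = some (DA.1.getD m 0) := by
    intro m hm
    rcases hg : DA.1.get? m with _ | v
    · have := hcont m hm
      rw [PySem.Dict.contains_eq_isSome_get?, hg] at this
      cases this
    · rw [PySem.Dict.getD_eq_get?_getD, hg]
      rfl
  -- initial stack invariants
  have hI2 : ∀ m, memA KEEP0 m = true → degOf edges (memA KEEP0) m ≤ 1 → m ∈ STACK0 := by
    intro m hm hd
    have hmn : m ∈ nodes := (hmem0 m).1 hm
    have hv : DA.1.getD m 0 ≤ 1 := by rw [hdeg0 m hm]; exact hd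
    have hitem : (m, DA.1.getD m 0) ∈ DA.1.items :=
      (PySem.Dict.get?_eq_some_iff_mem_items _ _ _ hnd).1 (hget m hmn)
    rw [hSTACK0, List.mem_reverse, List.mem_map]
    exact ⟨(m, DA.1.getD m 0), List.mem_filter.2 ⟨hitem, by rw [decide_eq_true_iff]; exact hv⟩, rfl⟩
  have hI3 : ∀ m, m ∈ STACK0 → memA KEEP0 m = true → degOf edges (memA KEEP0) m ≤ 1 := by
    intro m hms hm
    rw [hSTACK0, List.mem_reverse, List.mem_map] at hms
    obtain ⟨p, hpf, hp1⟩ := hms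
    obtain ⟨hpi, hple⟩ := List.mem_filter.1 hpf
    rw [decide_eq_true_iff] at hple
    have : DA.1.get? p.1 = some p.2 :=
      (PySem.Dict.get?_eq_some_iff_mem_items _ _ _ hnd).2 (by cases p; exact hpi)
    have hgd : DA.1.getD m 0 = p.2 := by
      rw [← hp1] at *
      rw [PySem.Dict.getD_eq_get?_getD, this]
      rfl
    rw [← hdeg0 m hm, hgd]
    exact hple
  -- run A's loop
  obtain ⟨hAa, hAb, hAc⟩ :=
    pyA_loop_main edges DA.2 hadj DA.1 KEEP0 STACK0 (fun m hm => hdeg0 m hm) hI2 hI3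
  rw [← hKF] at hAa hAb hAc
  -- A's keep keys stay unique
  have hndK : KF.keys.Nodup := by
    rw [hKF]
    refine pyA_loop_nodup _ _ _ _ ?_
    rw [hKEEP0]
    exact foldl_insert_nodup_keys _ _ _ (by simp [PySem.Dict.keys, PySem.Dict.empty])
  -- run B's loop
  have hsub0 : ∀ m, PySem.Set.contains (PySem.Set.ofList nodes) m = true → m ∈ nodes := by
    intro m hm
    rw [PySem.Set.contains_iff, PySem.Set.mem_ofList] at hm
    exact hm
  have hmemB : ∀ m, (PySem.Set.ofList nodes).contains m = true ↔ m ∈ nodes := by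
    intro m
    rw [PySem.Set.contains_iff, PySem.Set.mem_ofList]
  have hdegB : ∀ m, (PySem.Set.ofList nodes).contains m = true →
      DEGB.getD m 0 = degOf edges (fun x => PySem.Set.contains (PySem.Set.ofList nodes) x) m := by
    intro m hm
    rw [hDEGB, pyB_degInit, foldl_insert_const_getD]
    have hcong : ∀ e ∈ edges,
        ((if e.1 = m ∧ PySem.Set.contains (PySem.Set.ofList nodes) e.2.1 = true then (1 : Int) else 0)
          + (if e.2.1 = m ∧ PySem.Set.contains (PySem.Set.ofList nodes) e.1 = true then (1 : Int) else 0))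
        = ((if e.1 = m then (1 : Int) else 0) + (if e.2.1 = m then (1 : Int) else 0)) := by
      intro e he
      have m1 : (PySem.Set.ofList nodes).contains e.1 = true := (hmemB _).2 (hpre e he).1
      have m2 : (PySem.Set.ofList nodes).contains e.2.1 = true := (hmemB _).2 (hpre e he).2
      rw [m1, m2]
      simp
    rw [degOf, List.map_congr_left hcong]
    by_cases h : m ∈ nodes <;> simp [h]
  obtain ⟨hBa, hBb, hBc⟩ := pyB_loop_main nodes edges (PySem.Set.ofList nodes) DEGB hsub0 hdegB
  rw [← hBF] at hBa hBb hBc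
  -- the two kept sets agree
  have hAtoB : ∀ m, memA KF m = true → BF.contains m = true := by
    intro m hm
    refine hBc (memA KF) hAb ?_ m hm
    intro x hx
    rw [PySem.Set.contains_iff, PySem.Set.mem_ofList]
    exact (hmem0 x).1 (hAa x hx)
  have hBtoA : ∀ m, BF.contains m = true → memA KF m = true := by
    intro m hm
    refine hAc (fun x => BF.contains x) hBb ?_ m hm
    intro x hx
    exact (hmem0 x).2 (hsub0 x (hBa x hx))
  have heq : ∀ m, CORE.contains m = BF.contains m := by
    intro m
    rw [hCORE, core_contains KF hndK m]
    show memA KF m = BF.contains m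
    cases h1 : memA KF m
    · cases h2 : BF.contains m
      · rfl
      · rw [hBtoA m h2] at h1
        cases h1
    · exact (hAtoB m h1).symm
  have hfun : (fun (s : Int) (e : Int × Int × Int) =>
        if CORE.contains e.1 && CORE.contains e.2.1 then s + e.2.2 else s)
      = (fun (s : Int) (e : Int × Int × Int) =>
        if BF.contains e.1 && BF.contains e.2.1 then s + e.2.2 else s) := by
    funext s e
    rw [heq e.1, heq e.2.1]
  rw [hfun]
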